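-- pv_equiv track=rewrite | github.com/shardie-github/floyo | backend/guardian/inspector.py | _classify_events
-- ===== SOURCE A (Python) =====
-- from typing import Dict, List, Any
--
-- def _classify_events(entries: List[Dict[str, Any]]) -> Dict[str, Any]:
--     """Classify events by type, risk, and action."""
--     classifications = {
--         "by_type": {},
--         "by_risk": {},
--         "by_action": {},
--         "by_scope": {},
--         "by_data_class": {},
--     }
--
--     for entry in entries:
--         # By type
--         event_type = entry.get("event_type", "unknown")
--         classifications["by_type"][event_type] = classifications["by_type"].get(event_type, 0) + 1
--
--         # By risk
--         risk_level = entry.get("risk_level", "low")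
--         classifications["by_risk"][risk_level] = classifications["by_risk"].get(risk_level, 0) + 1
--
--         # By action
--         action = entry.get("guardian_action", "allow")
--         classifications["by_action"][action] = classifications["by_action"].get(action, 0) + 1
--
--         # By scope
--         scope = entry.get("scope", "app")
--         classifications["by_scope"][scope] = classifications["by_scope"].get(scope, 0) + 1
--
--         # By data class
--         data_class = entry.get("data_class", "telemetry")
--         classifications["by_data_class"][data_class] = classifications["by_data_class"].get(data_class, 0) + 1
--
--     return classifications
-- ===== SOURCE B (Python) =====
-- from typing import Dict, List, Any
-- from collections import Counter
--
--
-- def _classify_events(entries: List[Dict[str, Any]]) -> Dict[str, Any]: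
--     """Classify events by type, risk, and action."""
--     spec = [
--         ("by_type", "event_type", "unknown"),
--         ("by_risk", "risk_level", "low"),
--         ("by_action", "guardian_action", "allow"),
--         ("by_scope", "scope", "app"),
--         ("by_data_class", "data_class", "telemetry"),
--     ]
--     return {
--         out_key: dict(Counter(e.get(field, default) for e in entries))
--         for out_key, field, default in spec
--     }
-- ===== Notes on version B (the rewrite author's own statement) =====
-- stated objective: idiomatic
-- what changed: Replaces the single combined loop that hand-updates five nested count dicts with a spec table of (output key, field, default) triples and one independent collections.Counter pass over the entries per field.
import Mathlib
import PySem

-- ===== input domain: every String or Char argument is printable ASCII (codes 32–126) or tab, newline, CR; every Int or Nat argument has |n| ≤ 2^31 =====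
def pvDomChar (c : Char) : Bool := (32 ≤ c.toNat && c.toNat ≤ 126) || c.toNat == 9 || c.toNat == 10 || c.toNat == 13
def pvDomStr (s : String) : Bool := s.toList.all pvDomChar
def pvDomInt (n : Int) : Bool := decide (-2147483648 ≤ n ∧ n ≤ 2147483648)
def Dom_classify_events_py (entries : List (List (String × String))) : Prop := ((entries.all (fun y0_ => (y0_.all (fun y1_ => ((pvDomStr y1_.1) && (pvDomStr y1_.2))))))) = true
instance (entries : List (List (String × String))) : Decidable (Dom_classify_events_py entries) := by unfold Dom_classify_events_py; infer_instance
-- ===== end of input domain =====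

-- B restates A's combined five-dict loop as a spec table driving five independent Counter passes: idiomatic, same cost.

-- ===== PORT A =====
-- entry.get(field, default): first match in the association list (a Python dict has unique keys)
def pvEntryGet (e : List (String × String)) (field dflt : String) : String :=
  match e.find? (fun p => p.1 == field) with
  | some p => p.2
  | none => dflt

-- A's `classifications` outer dict has the five fixed keys throughout; it is carried as a
-- 5-tuple of inner dicts (one per fixed key), updated exactly as A's loop body updates them,
-- and reassembled under the fixed keys (in A's insertion order) at the return.
def classify_events_py (entries : List (List (String × String))) : List (String × List (String × Int)) :=
  let cls :=
    entries.foldl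
      (fun (c : PySem.Dict String Int × PySem.Dict String Int × PySem.Dict String Int ×
                PySem.Dict String Int × PySem.Dict String Int) entry =>
        let event_type := pvEntryGet entry "event_type" "unknown"
        let byType := c.1.insert event_type (c.1.getD event_type 0 + 1)
        let risk_level := pvEntryGet entry "risk_level" "low"
        let byRisk := c.2.1.insert risk_level (c.2.1.getD risk_level 0 + 1)
        let action := pvEntryGet entry "guardian_action" "allow"
        let byAction := c.2.2.1.insert action (c.2.2.1.getD action 0 + 1)
        let scope := pvEntryGet entry "scope" "app"
        let byScope := c.2.2.2.1.insert scope (c.2.2.2.1.getD scope 0 + 1)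
        let data_class := pvEntryGet entry "data_class" "telemetry"
        let byDataClass := c.2.2.2.2.insert data_class (c.2.2.2.2.getD data_class 0 + 1)
        (byType, byRisk, byAction, byScope, byDataClass))
      (PySem.Dict.empty, PySem.Dict.empty, PySem.Dict.empty, PySem.Dict.empty, PySem.Dict.empty)
  [("by_type", cls.1.items), ("by_risk", cls.2.1.items), ("by_action", cls.2.2.1.items),
   ("by_scope", cls.2.2.2.1.items), ("by_data_class", cls.2.2.2.2.items)]

-- ===== PORT B =====
def pvSpec : List (String × String × String) :=
  [("by_type", "event_type", "unknown"),
   ("by_risk", "risk_level", "low"),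
   ("by_action", "guardian_action", "allow"),
   ("by_scope", "scope", "app"),
   ("by_data_class", "data_class", "telemetry")]

def classify_events_py_alt (entries : List (List (String × String))) : List (String × List (String × Int)) :=
  pvSpec.map (fun s =>
    (s.1, (PySem.Dict.counter (entries.map (fun e => pvEntryGet e s.2.1 s.2.2))).items))

-- ===== PRECONDITION & SPEC =====
def Spec_classify_events_py (entries : List (List (String × String))) (out : List (String × List (String × Int))) : Prop := out = classify_events_py_alt entries
instance (entries : List (List (String × String))) (out : List (String × List (String × Int))) : Decidable (Spec_classify_events_py entries out) := by unfold Spec_classify_events_py; infer_instance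

-- ===== CLAIM (what is proved, stated in full; the proofs are below) =====
def Claim_equal_classify_events_py : Prop := ∀ (entries : List (List (String × String))), Dom_classify_events_py entries → Spec_classify_events_py entries (classify_events_py entries)

-- ===== LEMMAS AND PROOFS =====

-- A's combined fold over a 5-tuple state is the tuple of the five independent component folds.
theorem pv_foldl_tuple5 {α σ₁ σ₂ σ₃ σ₄ σ₅ : Type}
    (u₁ : σ₁ → α → σ₁) (u₂ : σ₂ → α → σ₂) (u₃ : σ₃ → α → σ₃) (u₄ : σ₄ → α → σ₄) (u₅ : σ₅ → α → σ₅)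
    (l : List α) (s₁ : σ₁) (s₂ : σ₂) (s₃ : σ₃) (s₄ : σ₄) (s₅ : σ₅) :
    l.foldl (fun (c : σ₁ × σ₂ × σ₃ × σ₄ × σ₅) x =>
        (u₁ c.1 x, u₂ c.2.1 x, u₃ c.2.2.1 x, u₄ c.2.2.2.1 x, u₅ c.2.2.2.2 x)) (s₁, s₂, s₃, s₄, s₅)
    = (l.foldl u₁ s₁, l.foldl u₂ s₂, l.foldl u₃ s₃, l.foldl u₄ s₄, l.foldl u₅ s₅) := by
  induction l generalizing s₁ s₂ s₃ s₄ s₅ with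
  | nil => rfl
  | cons x xs ih => simp [List.foldl_cons, ih]

-- A's hand-written count fold over one field equals B's Counter over the mapped keys.
theorem pv_count_field (entries : List (List (String × String))) (field dflt : String) :
    entries.foldl (fun (d : PySem.Dict String Int) e =>
        d.insert (pvEntryGet e field dflt) (d.getD (pvEntryGet e field dflt) 0 + 1)) PySem.Dict.empty
    = PySem.Dict.counter (entries.map (fun e => pvEntryGet e field dflt)) := by
  rw [← PySem.Dict.foldl_insert_getD_add_one_eq_counter, List.foldl_map]


-- A's combined fold, with its state split: exactly the port's loop body, each component independent.
theorem pv_split (l : List (List (String × String)))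
    (s₁ s₂ s₃ s₄ s₅ : PySem.Dict String Int) :
    l.foldl
      (fun (c : PySem.Dict String Int × PySem.Dict String Int × PySem.Dict String Int ×
                PySem.Dict String Int × PySem.Dict String Int) entry =>
        let event_type := pvEntryGet entry "event_type" "unknown"
        let byType := c.1.insert event_type (c.1.getD event_type 0 + 1)
        let risk_level := pvEntryGet entry "risk_level" "low"
        let byRisk := c.2.1.insert risk_level (c.2.1.getD risk_level 0 + 1)
        let action := pvEntryGet entry "guardian_action" "allow"
        let byAction := c.2.2.1.insert action (c.2.2.1.getD action 0 + 1)
        let scope := pvEntryGet entry "scope" "app"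
        let byScope := c.2.2.2.1.insert scope (c.2.2.2.1.getD scope 0 + 1)
        let data_class := pvEntryGet entry "data_class" "telemetry"
        let byDataClass := c.2.2.2.2.insert data_class (c.2.2.2.2.getD data_class 0 + 1)
        (byType, byRisk, byAction, byScope, byDataClass)) (s₁, s₂, s₃, s₄, s₅)
    = (l.foldl (fun d e => d.insert (pvEntryGet e "event_type" "unknown") (d.getD (pvEntryGet e "event_type" "unknown") 0 + 1)) s₁,
       l.foldl (fun d e => d.insert (pvEntryGet e "risk_level" "low") (d.getD (pvEntryGet e "risk_level" "low") 0 + 1)) s₂,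
       l.foldl (fun d e => d.insert (pvEntryGet e "guardian_action" "allow") (d.getD (pvEntryGet e "guardian_action" "allow") 0 + 1)) s₃,
       l.foldl (fun d e => d.insert (pvEntryGet e "scope" "app") (d.getD (pvEntryGet e "scope" "app") 0 + 1)) s₄,
       l.foldl (fun d e => d.insert (pvEntryGet e "data_class" "telemetry") (d.getD (pvEntryGet e "data_class" "telemetry") 0 + 1)) s₅) :=
  pv_foldl_tuple5
    (fun d e => d.insert (pvEntryGet e "event_type" "unknown") (d.getD (pvEntryGet e "event_type" "unknown") 0 + 1))
    (fun d e => d.insert (pvEntryGet e "risk_level" "low") (d.getD (pvEntryGet e "risk_level" "low") 0 + 1))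
    (fun d e => d.insert (pvEntryGet e "guardian_action" "allow") (d.getD (pvEntryGet e "guardian_action" "allow") 0 + 1))
    (fun d e => d.insert (pvEntryGet e "scope" "app") (d.getD (pvEntryGet e "scope" "app") 0 + 1))
    (fun d e => d.insert (pvEntryGet e "data_class" "telemetry") (d.getD (pvEntryGet e "data_class" "telemetry") 0 + 1))
    l s₁ s₂ s₃ s₄ s₅

-- ===== VERDICT (by name: the statement is the Claim_ definition above) =====
theorem classify_events_py_spec : Claim_equal_classify_events_py := by
  intro entries _
  show classify_events_py entries = classify_events_py_alt entries
  unfold classify_events_py classify_events_py_alt pvSpec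
  simp only [List.map_cons, List.map_nil]
  rw [pv_split]
  simp only [pv_count_field]
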